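-- pv_equiv track=rewrite | github.com/Hugopeck/archeia-track-archive | tools/track-lint.py | globs_overlap
-- ===== SOURCE A (Python) =====
-- def globs_overlap(globs_a, globs_b):
--     """Check if any pair of glob patterns could match the same file.
--
--     Simple heuristic: strip ** suffixes and check if one path is a prefix of the other.
--     """
--     for a in globs_a:
--         for b in globs_b:
--             a_base = a.rstrip("*").rstrip("/")
--             b_base = b.rstrip("*").rstrip("/")
--
--             if not a_base or not b_base:
--                 return True  # Root-level glob overlaps with everything
--
--             if a_base.startswith(b_base) or b_base.startswith(a_base):
--                 return True
--
--     return False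
-- ===== SOURCE B (Python) =====
-- def globs_overlap(globs_a, globs_b):
--     """Same check, but with bases computed once and hash-indexed prefix sets
--     replacing the inner scan over globs_b."""
--     if not globs_a or not globs_b:
--         return False
--     bases_a = [g.rstrip("*").rstrip("/") for g in globs_a]
--     bases_b = [g.rstrip("*").rstrip("/") for g in globs_b]
--     if "" in bases_a or "" in bases_b:
--         return True
--     set_b = set(bases_b)
--     prefixes_b = {b[:i] for b in set_b for i in range(1, len(b) + 1)}
--     for a in bases_a:
--         if a in prefixes_b:
--             return True
--         if any(a[:i] in set_b for i in range(1, len(a) + 1)):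
--             return True
--     return False
-- ===== Notes on version B (the rewrite author's own statement) =====
-- stated objective: alternative
-- what changed: B strips each glob's base once, puts globs_b's bases and all their prefixes into hash sets, and replaces A's inner scan over globs_b (which re-strips both globs on every pair) by set lookups per glob in globs_a; it trades the pairwise scan for precomputed indexes, which costs more when A exits early.
import Mathlib
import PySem

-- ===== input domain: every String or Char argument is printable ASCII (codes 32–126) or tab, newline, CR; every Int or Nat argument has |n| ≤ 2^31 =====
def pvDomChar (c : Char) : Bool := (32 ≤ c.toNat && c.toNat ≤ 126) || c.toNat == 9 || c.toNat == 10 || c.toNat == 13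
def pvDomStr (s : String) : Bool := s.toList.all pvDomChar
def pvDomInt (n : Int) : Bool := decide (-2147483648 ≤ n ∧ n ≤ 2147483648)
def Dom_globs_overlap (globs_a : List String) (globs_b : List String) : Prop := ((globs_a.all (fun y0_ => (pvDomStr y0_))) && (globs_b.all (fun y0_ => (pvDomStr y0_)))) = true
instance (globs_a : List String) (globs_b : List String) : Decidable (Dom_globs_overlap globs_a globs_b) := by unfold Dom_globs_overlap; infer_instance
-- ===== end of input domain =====

-- B strips each base once and replaces A's inner scan over globs_b by lookups in two
-- precomputed sets (globs_b's bases and all their prefixes); an alternative algorithm of similar cost.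

-- ===== PORT A =====
-- s.rstrip(c) for a single strip character c: exact hand port (drop trailing copies of c).
def pyRstripChar (cs : List Char) (c : Char) : List Char := (cs.reverse.dropWhile (· == c)).reverse

-- g.rstrip("*").rstrip("/") on the code points of g
def globBase (g : String) : List Char := pyRstripChar (pyRstripChar g.toList '*') '/'

-- the nested for-loops with early 'return True' = nested List.any
def globs_overlap (globs_a : List String) (globs_b : List String) : Bool :=
  globs_a.any (fun a => globs_b.any (fun b =>
    let a_base := globBase a
    let b_base := globBase b
    if a_base.isEmpty || b_base.isEmpty then true
    else PySem.Chars.startswith a_base b_base || PySem.Chars.startswith b_base a_base))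

-- ===== PORT B =====
def globs_overlap_alt (globs_a : List String) (globs_b : List String) : Bool :=
  if globs_a.isEmpty || globs_b.isEmpty then false
  else
    let bases_a := globs_a.map globBase
    let bases_b := globs_b.map globBase
    if bases_a.contains [] || bases_b.contains [] then true
    else
      let set_b : PySem.Set (List Char) := PySem.Set.ofList bases_b
      let prefixes_b : PySem.Set (List Char) :=
        PySem.Set.ofList (set_b.flatMap (fun b =>
          (PySem.List.pyRange 1 ((b.length : Int) + 1) 1).map
            (fun i => PySem.List.slice b none (some i))))
      bases_a.any (fun a =>
        PySem.Set.contains prefixes_b a ||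
        (PySem.List.pyRange 1 ((a.length : Int) + 1) 1).any
          (fun i => PySem.Set.contains set_b (PySem.List.slice a none (some i))))

-- ===== PRECONDITION & SPEC =====
def Spec_globs_overlap (globs_a : List String) (globs_b : List String) (out : Bool) : Prop := out = globs_overlap_alt globs_a globs_b
instance (globs_a : List String) (globs_b : List String) (out : Bool) : Decidable (Spec_globs_overlap globs_a globs_b out) := by unfold Spec_globs_overlap; infer_instance

-- ===== CLAIM (what is proved, stated in full; the proofs are below) =====
def Claim_equal_globs_overlap : Prop := ∀ (globs_a : List String) (globs_b : List String), Dom_globs_overlap globs_a globs_b → Spec_globs_overlap globs_a globs_b (globs_overlap globs_a globs_b)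

-- ===== LEMMAS AND PROOFS =====

theorem A_iff (ga gb : List String) : globs_overlap ga gb = true ↔
    ∃ a ∈ ga, ∃ b ∈ gb, (globBase a = [] ∨ globBase b = [] ∨
      globBase b <+: globBase a ∨ globBase a <+: globBase b) := by
  simp [globs_overlap, List.any_eq_true, PySem.Chars.startswith_iff,
    List.isEmpty_iff, or_assoc]

theorem B_iff (ga gb : List String) : globs_overlap_alt ga gb = true ↔
    ((¬ga = [] ∧ ¬gb = []) ∧
      (((∃ a ∈ ga, globBase a = []) ∨ ∃ a ∈ gb, globBase a = []) ∨
        ∃ x ∈ ga,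
          (∃ a ∈ gb, ∃ i : Int,
              (1 ≤ i ∧ i ≤ ((globBase a).length : Int)) ∧
                PySem.List.slice (globBase a) none (some i) = globBase x) ∨
            ∃ i : Int,
              (1 ≤ i ∧ i ≤ ((globBase x).length : Int)) ∧
                ∃ a ∈ gb, globBase a = PySem.List.slice (globBase x) none (some i))) := by
  simp [globs_overlap_alt, List.any_eq_true, PySem.Set.contains, List.isEmpty_iff,
    PySem.Set.mem_ofList, List.mem_flatMap, List.mem_map, PySem.List.mem_pyRange_one]

-- nonempty prefixes are exactly the slices y[:i], 1 ≤ i ≤ len y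
theorem slice_pref_of (y x : List Char) (i : Int) (h1 : 1 ≤ i)
    (h3 : PySem.List.slice y none (some i) = x) : x <+: y := by
  rw [PySem.List.slice_to y (by omega)] at h3
  exact h3 ▸ List.take_prefix _ _

theorem pref_slice (y x : List Char) (hx : x ≠ []) (h : x <+: y) :
    ∃ i : Int, (1 ≤ i ∧ i ≤ (y.length : Int)) ∧
      PySem.List.slice y none (some i) = x := by
  refine ⟨(x.length : Int), ⟨?_, ?_⟩, ?_⟩
  · have := List.length_pos_iff.mpr hx; omega
  · exact_mod_cast h.length_le
  · rw [PySem.List.slice_to y (by positivity)]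
    simpa using (List.prefix_iff_eq_take.mp h).symm

theorem globs_overlap_spec : Claim_equal_globs_overlap := by
  intro ga gb _
  unfold Spec_globs_overlap
  have key : globs_overlap ga gb = true ↔ globs_overlap_alt ga gb = true := by
    rw [A_iff, B_iff]
    constructor
    · rintro ⟨a, ha, b, hb, hc⟩
      refine ⟨⟨List.ne_nil_of_mem ha, List.ne_nil_of_mem hb⟩, ?_⟩
      by_cases hae : globBase a = []
      · exact Or.inl (Or.inl ⟨a, ha, hae⟩)
      by_cases hbe : globBase b = []
      · exact Or.inl (Or.inr ⟨b, hb, hbe⟩)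
      rcases hc with h | h | h | h
      · exact absurd h hae
      · exact absurd h hbe
      · -- globBase b <+: globBase a : b's base is a prefix of a's
        rcases pref_slice (globBase a) (globBase b) hbe h with ⟨i, hi, hs⟩
        exact Or.inr ⟨a, ha, Or.inr ⟨i, hi, b, hb, hs.symm⟩⟩
      · -- globBase a <+: globBase b
        rcases pref_slice (globBase b) (globBase a) hae h with ⟨i, hi, hs⟩
        exact Or.inr ⟨a, ha, Or.inl ⟨b, hb, i, hi, hs⟩⟩
    · rintro ⟨⟨hga, hgb⟩, hrest⟩
      rcases hrest with (⟨a, ha, hae⟩ | ⟨b, hb, hbe⟩) | ⟨x, hx, hc⟩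
      · rcases List.exists_mem_of_ne_nil gb hgb with ⟨b, hb⟩
        exact ⟨a, ha, b, hb, Or.inl hae⟩
      · rcases List.exists_mem_of_ne_nil ga hga with ⟨a, ha⟩
        exact ⟨a, ha, b, hb, Or.inr (Or.inl hbe)⟩
      · rcases hc with ⟨b, hb, i, ⟨h1, _⟩, hs⟩ | ⟨i, ⟨h1, _⟩, b, hb, hs⟩
        · exact ⟨x, hx, b, hb, Or.inr (Or.inr (Or.inr (slice_pref_of _ _ i h1 hs)))⟩
        · exact ⟨x, hx, b, hb, Or.inr (Or.inr (Or.inl (slice_pref_of _ _ i h1 hs.symm)))⟩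
  cases hA : globs_overlap ga gb <;> cases hB : globs_overlap_alt ga gb <;> simp_all
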